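-- pv_equiv track=rewrite | github.com/scottlz0310/ci-helper | src/ci_helper/ai/pattern_fallback_handler.py | _guess_log_format
-- ===== SOURCE A (Python) =====
-- def _guess_log_format(sample_lines: list[str]) -> str:
--     """ログ形式を推測
--
--     Args:
--         sample_lines: サンプル行
--
--     Returns:
--         推測されたログ形式
--     """
--     formats = {
--         "github_actions": ["##[", "::"],
--         "docker": ["STEP", "RUN", "COPY"],
--         "npm": ["npm ERR!", "npm WARN"],
--         "python": ["Traceback", 'File "', "line "],
--         "generic": [],
--     }
--
--     for format_name, keywords in formats.items():
--         if format_name == "generic":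
--             continue
--         if any(any(keyword in line for keyword in keywords) for line in sample_lines):
--             return format_name
--
--     return "generic"
-- ===== SOURCE B (Python) =====
-- def _guess_log_format(sample_lines: list[str]) -> str:
--     """Collect-then-rank: one pass over lines against a flat keyword table,
--     then pick the highest-priority matched format."""
--     table = [
--         ("##[", "github_actions"), ("::", "github_actions"),
--         ("STEP", "docker"), ("RUN", "docker"), ("COPY", "docker"),
--         ("npm ERR!", "npm"), ("npm WARN", "npm"),
--         ("Traceback", "python"), ('File "', "python"), ("line ", "python"),
--     ]
--     matched = set()
--     for line in sample_lines:
--         for kw, fmt in table: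
--             if kw in line:
--                 matched.add(fmt)
--     for fmt in ["github_actions", "docker", "npm", "python"]:
--         if fmt in matched:
--             return fmt
--     return "generic"
-- ===== Notes on version B (the rewrite author's own statement) =====
-- stated objective: faster
-- what changed: Replaces A's per-format nested generator scan with a collect-then-rank decomposition: one pass over the lines builds a set of matched format names from a flat keyword table, then a fixed priority list picks the winner; plain loops over the flat table avoid A's per-line nested generator-expression overhead.
import Mathlib
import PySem

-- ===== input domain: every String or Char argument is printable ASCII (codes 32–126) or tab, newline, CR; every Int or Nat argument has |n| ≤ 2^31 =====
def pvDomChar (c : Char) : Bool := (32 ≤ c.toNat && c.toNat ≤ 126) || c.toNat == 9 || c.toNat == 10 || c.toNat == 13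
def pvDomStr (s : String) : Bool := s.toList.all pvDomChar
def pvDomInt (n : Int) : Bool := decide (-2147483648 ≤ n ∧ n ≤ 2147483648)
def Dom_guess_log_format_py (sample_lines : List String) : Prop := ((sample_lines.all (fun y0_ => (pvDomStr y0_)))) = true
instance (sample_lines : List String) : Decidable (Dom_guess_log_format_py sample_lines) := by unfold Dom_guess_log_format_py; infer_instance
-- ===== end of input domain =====

-- B replaces A's per-format early-exit nested scan by a collect-then-rank pass (alternative decomposition, same results).

-- ===== PORT A =====
-- the literal `formats` dict of A, in insertion order
def pvFormatsA : List (String × List String) :=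
  [("github_actions", ["##[", "::"]),
   ("docker", ["STEP", "RUN", "COPY"]),
   ("npm", ["npm ERR!", "npm WARN"]),
   ("python", ["Traceback", "File \"", "line "]),
   ("generic", [])]

-- the `for format_name, keywords in formats.items():` loop with its continue / early return
def pvLoopA : List (String × List String) → List String → String
  | [], _ => "generic"
  | (name, kws) :: rest, lines =>
    if name == "generic" then pvLoopA rest lines
    else if lines.any (fun line => kws.any (fun kw => PySem.Str.isIn kw line)) then name
    else pvLoopA rest lines

def guess_log_format_py (sample_lines : List String) : String :=
  pvLoopA pvFormatsA sample_lines

-- ===== PORT B =====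
-- flat keyword → format table of B
def pvTableB : List (String × String) :=
  [("##[", "github_actions"), ("::", "github_actions"),
   ("STEP", "docker"), ("RUN", "docker"), ("COPY", "docker"),
   ("npm ERR!", "npm"), ("npm WARN", "npm"),
   ("Traceback", "python"), ("File \"", "python"), ("line ", "python")]

def guess_log_format_py_alt (sample_lines : List String) : String :=
  let matched : PySem.Set String :=
    sample_lines.foldl
      (fun s line =>
        pvTableB.foldl (fun s p => if PySem.Str.isIn p.1 line then PySem.Set.add s p.2 else s) s)
      PySem.Set.empty
  match ["github_actions", "docker", "npm", "python"].find? (fun f => PySem.Set.contains matched f) with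
  | some f => f
  | none => "generic"

-- ===== PRECONDITION & SPEC =====
def Spec_guess_log_format_py (sample_lines : List String) (out : String) : Prop := out = guess_log_format_py_alt sample_lines
instance (sample_lines : List String) (out : String) : Decidable (Spec_guess_log_format_py sample_lines out) := by unfold Spec_guess_log_format_py; infer_instance

-- ===== CLAIM (what is proved, stated in full; the proofs are below) =====
def Claim_equal_guess_log_format_py : Prop := ∀ (sample_lines : List String), Dom_guess_log_format_py sample_lines → Spec_guess_log_format_py sample_lines (guess_log_format_py sample_lines)

-- ===== LEMMAS AND PROOFS =====

-- membership in the inner (per-line) fold over an arbitrary table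
theorem mem_innerFoldB (t : List (String × String)) (s : List String) (line f : String) :
    f ∈ t.foldl (fun s p => if PySem.Str.isIn p.1 line then PySem.Set.add s p.2 else s) s ↔
      f ∈ s ∨ ∃ p ∈ t, PySem.Str.isIn p.1 line = true ∧ p.2 = f := by
  induction t generalizing s with
  | nil => simp
  | cons p t ih =>
    rw [List.foldl_cons]
    split_ifs with h
    · rw [ih]
      simp only [PySem.Set.mem_add, List.exists_mem_cons_iff, h]
      tauto
    · rw [ih]
      simp only [List.exists_mem_cons_iff]
      have h' : ¬(PySem.Str.isIn p.1 line = true ∧ p.2 = f) := fun hc => h hc.1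
      tauto

-- membership in B's matched set
theorem mem_matchedB (lines : List String) (s : List String) (f : String) :
    f ∈ lines.foldl
        (fun s line =>
          pvTableB.foldl (fun s p => if PySem.Str.isIn p.1 line then PySem.Set.add s p.2 else s) s)
        s ↔
      f ∈ s ∨ ∃ line ∈ lines, ∃ p ∈ pvTableB, PySem.Str.isIn p.1 line = true ∧ p.2 = f := by
  induction lines generalizing s with
  | nil => simp
  | cons l ls ih =>
    rw [List.foldl_cons, ih, mem_innerFoldB]
    simp only [List.exists_mem_cons_iff]
    exact or_assoc

-- ===== VERDICT (by name: the statement is the Claim_ definition above) =====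
theorem pvContains_iff (s : List String) (f : String) : PySem.Set.contains s f = true ↔ f ∈ s := by
  simp [PySem.Set.contains]

theorem guess_log_format_py_spec : Claim_equal_guess_log_format_py := by
  intro lines _
  unfold Spec_guess_log_format_py guess_log_format_py guess_log_format_py_alt
  have key : ∀ f : String,
      PySem.Set.contains
        (lines.foldl
          (fun s line =>
            pvTableB.foldl (fun s p => if PySem.Str.isIn p.1 line then PySem.Set.add s p.2 else s) s)
          PySem.Set.empty) f = true ↔
      ∃ line ∈ lines, ∃ p ∈ pvTableB, PySem.Str.isIn p.1 line = true ∧ p.2 = f := by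
    intro f
    rw [pvContains_iff, mem_matchedB]
    simp [PySem.Set.empty]
  have cB : ∀ (f : String) (kws : List String),
      (∀ line : String, (∃ p ∈ pvTableB, PySem.Str.isIn p.1 line = true ∧ p.2 = f) ↔
          ∃ kw ∈ kws, PySem.Str.isIn kw line = true) →
      PySem.Set.contains
        (lines.foldl
          (fun s line =>
            pvTableB.foldl (fun s p => if PySem.Str.isIn p.1 line then PySem.Set.add s p.2 else s) s)
          PySem.Set.empty) f = (lines.any fun line => kws.any fun kw => PySem.Str.isIn kw line) := by
    intro f kws h
    rw [Bool.eq_iff_iff, key]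
    simp only [h]
    simp [List.any_eq_true]
  have cG := cB "github_actions" ["##[", "::"] (fun line => by simp [pvTableB])
  have cD := cB "docker" ["STEP", "RUN", "COPY"] (fun line => by simp [pvTableB])
  have cN := cB "npm" ["npm ERR!", "npm WARN"] (fun line => by simp [pvTableB])
  have cP := cB "python" ["Traceback", "File \"", "line "] (fun line => by simp [pvTableB])
  simp only [pvLoopA, pvFormatsA, List.find?]
  rw [cG, cD, cN, cP]
  rcases Bool.eq_false_or_eq_true (lines.any fun line => (["##[", "::"] : List String).any fun kw => PySem.Str.isIn kw line) with hG | hG <;>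
  rcases Bool.eq_false_or_eq_true (lines.any fun line => (["STEP", "RUN", "COPY"] : List String).any fun kw => PySem.Str.isIn kw line) with hD | hD <;>
  rcases Bool.eq_false_or_eq_true (lines.any fun line => (["npm ERR!", "npm WARN"] : List String).any fun kw => PySem.Str.isIn kw line) with hN | hN <;>
  rcases Bool.eq_false_or_eq_true (lines.any fun line => (["Traceback", "File \"", "line "] : List String).any fun kw => PySem.Str.isIn kw line) with hP | hP <;>
  rw [hG, hD, hN, hP] <;> rfl
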